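-- pv_equiv track=rewrite | github.com/DadanLuo/bazi_agent | src/memory/summarizer.py | get_conversation_stats
-- ===== SOURCE A (Python) =====
-- from typing import List, Dict, Any, Optional
--
-- def get_conversation_stats(messages: List[Dict[str, str]]) -> Dict[str, Any]:
--     """
--     获取会话统计信息
--
--     Args:
--         messages: 消息列表
--
--     Returns:
--         统计信息字典
--     """
--     if not messages:
--         return {
--             "total_messages": 0,
--             "user_messages": 0,
--             "assistant_messages": 0,
--             "total_chars": 0,
--             "avg_message_length": 0
--         }
--
--     user_count = sum(1 for msg in messages if msg.get("role") == "user")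
--     assistant_count = sum(1 for msg in messages if msg.get("role") == "assistant")
--     total_chars = sum(len(msg.get("content", "")) for msg in messages)
--
--     return {
--         "total_messages": len(messages),
--         "user_messages": user_count,
--         "assistant_messages": assistant_count,
--         "total_chars": total_chars,
--         "avg_message_length": total_chars // len(messages) if messages else 0
--     }
-- ===== SOURCE B (Python) =====
-- def get_conversation_stats(messages):
--     user_count = 0
--     assistant_count = 0
--     total_chars = 0
--     for msg in messages:
--         role = msg.get("role")
--         if role == "user":
--             user_count += 1
--         elif role == "assistant":
--             assistant_count += 1
--         total_chars += len(msg.get("content", ""))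
--     n = len(messages)
--     return {
--         "total_messages": n,
--         "user_messages": user_count,
--         "assistant_messages": assistant_count,
--         "total_chars": total_chars,
--         "avg_message_length": total_chars // n if n else 0,
--     }
-- ===== Notes on version B (the rewrite author's own statement) =====
-- stated objective: simpler
-- what changed: Replaced the empty-list early return plus three separate generator-expression scans by a single accumulating loop over the messages that maintains all three counters at once, with the average guarded by a ternary on len(messages).
import Mathlib
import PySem

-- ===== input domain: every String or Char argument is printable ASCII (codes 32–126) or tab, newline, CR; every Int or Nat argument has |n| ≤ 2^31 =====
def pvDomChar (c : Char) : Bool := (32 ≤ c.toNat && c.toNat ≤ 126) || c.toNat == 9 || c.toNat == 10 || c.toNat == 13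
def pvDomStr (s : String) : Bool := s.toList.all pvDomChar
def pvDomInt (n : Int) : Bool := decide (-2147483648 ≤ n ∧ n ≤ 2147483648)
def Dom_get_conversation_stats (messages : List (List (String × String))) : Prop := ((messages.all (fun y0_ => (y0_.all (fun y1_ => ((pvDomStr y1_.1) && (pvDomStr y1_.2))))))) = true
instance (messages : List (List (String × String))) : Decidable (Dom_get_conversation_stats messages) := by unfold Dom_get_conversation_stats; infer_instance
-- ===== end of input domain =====

-- ===== PORT A =====
-- B merges A's three separate scans into one accumulating loop; objective: simpler.
-- first-match lookup, = msg.get(k) / msg.get(k, dflt)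
def pvLookup (m : List (String × String)) (k : String) : Option String :=
  (PySem.Dict.mk m).get? k

def get_conversation_stats (messages : List (List (String × String))) : List (String × Int) :=
  if messages.isEmpty then
    [("total_messages", 0), ("user_messages", 0), ("assistant_messages", 0),
     ("total_chars", 0), ("avg_message_length", 0)]
  else
    let user_count : Int :=
      messages.foldl (fun acc msg => if pvLookup msg "role" = some "user" then acc + 1 else acc) 0
    let assistant_count : Int :=
      messages.foldl (fun acc msg => if pvLookup msg "role" = some "assistant" then acc + 1 else acc) 0
    let total_chars : Int :=
      messages.foldl (fun acc msg =>
        acc + PySem.Str.len (((PySem.Dict.mk msg).getD "content" ""))) 0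
    [("total_messages", (messages.length : Int)),
     ("user_messages", user_count),
     ("assistant_messages", assistant_count),
     ("total_chars", total_chars),
     ("avg_message_length", PySem.Int.floordiv total_chars (messages.length : Int))]

-- ===== PORT B =====
-- single pass: state = (user_count, assistant_count, total_chars)
def pvStep (st : Int × Int × Int) (msg : List (String × String)) : Int × Int × Int :=
  let role := (PySem.Dict.mk msg).get? "role"
  let st' :=
    if role = some "user" then (st.1 + 1, st.2.1, st.2.2)
    else if role = some "assistant" then (st.1, st.2.1 + 1, st.2.2)
    else st
  (st'.1, st'.2.1, st'.2.2 + PySem.Str.len ((PySem.Dict.mk msg).getD "content" ""))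

def get_conversation_stats_alt (messages : List (List (String × String))) : List (String × Int) :=
  let st := messages.foldl pvStep (0, 0, 0)
  let n : Int := messages.length
  [("total_messages", n),
   ("user_messages", st.1),
   ("assistant_messages", st.2.1),
   ("total_chars", st.2.2),
   ("avg_message_length", if n = 0 then 0 else PySem.Int.floordiv st.2.2 n)]

-- ===== PRECONDITION & SPEC =====
def Spec_get_conversation_stats (messages : List (List (String × String))) (out : List (String × Int)) : Prop := out = get_conversation_stats_alt messages
instance (messages : List (List (String × String))) (out : List (String × Int)) : Decidable (Spec_get_conversation_stats messages out) := by unfold Spec_get_conversation_stats; infer_instance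

-- ===== CLAIM =====
def Claim_equal_get_conversation_stats : Prop := ∀ (messages : List (List (String × String))), Dom_get_conversation_stats messages → Spec_get_conversation_stats messages (get_conversation_stats messages)

-- ===== LEMMAS AND PROOFS =====
-- the single-pass fold computes the three independent folds componentwise
theorem pvStep_foldl (messages : List (List (String × String))) :
    ∀ u a t : Int,
      messages.foldl pvStep (u, a, t) =
        (messages.foldl (fun acc msg => if pvLookup msg "role" = some "user" then acc + 1 else acc) u,
         messages.foldl (fun acc msg => if pvLookup msg "role" = some "assistant" then acc + 1 else acc) a,
         messages.foldl (fun acc msg =>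
           acc + PySem.Str.len ((PySem.Dict.mk msg).getD "content" "")) t) := by
  induction messages with
  | nil => intro u a t; simp
  | cons m ms ih =>
    intro u a t
    simp only [List.foldl_cons, ih]
    unfold pvStep pvLookup
    by_cases hu : (PySem.Dict.mk m).get? "role" = some "user"
    · simp [hu]
    · by_cases ha : (PySem.Dict.mk m).get? "role" = some "assistant" <;> simp [hu, ha]

-- ===== VERDICT =====
theorem get_conversation_stats_spec : Claim_equal_get_conversation_stats := by
  intro messages _
  unfold Spec_get_conversation_stats get_conversation_stats get_conversation_stats_alt
  cases messages with
  | nil => decide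
  | cons m ms =>
    simp only [List.isEmpty_cons, if_neg, Bool.false_eq_true, not_false_eq_true,
      pvStep_foldl]
    have h : ¬ ((ms.length : Int) + 1 = 0) := by omega
    simp [h]
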